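-- pv_equiv track=rewrite | github.com/zznidar/OP2021 | vaje/kolokvij1/naloga2-3/.ipynb_checkpoints/naloge-checkpoint.py | naj_padavin
-- ===== SOURCE A (Python) =====
-- def naj_padavin(s):
--     naj_kolicina = 0
--     naj_datumi = set()
--
--     for d, _, k, _ in s:
--         if k > naj_kolicina:
--             naj_kolicina = k
--             naj_datumi = {d}
--         elif k == naj_kolicina:
--             naj_datumi.add(d)
--
--     return naj_datumi
-- ===== SOURCE B (Python) =====
-- def naj_padavin(s):
--     # two-pass: compute the maximum amount (floored at 0), then collect matching dates
--     m = 0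
--     for _, _, k, _ in s:
--         if k > m:
--             m = k
--     return {d for d, _, k, _ in s if k == m}
-- ===== Notes on version B (the rewrite author's own statement) =====
-- stated objective: simpler
-- what changed: Replaces A's single fused max-tracking-and-collect pass (with set resets on a new maximum) by a two-pass decomposition: first compute the maximum amount m (seeded at 0 like A), then a set comprehension over the input collecting dates whose amount equals m.
import Mathlib
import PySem

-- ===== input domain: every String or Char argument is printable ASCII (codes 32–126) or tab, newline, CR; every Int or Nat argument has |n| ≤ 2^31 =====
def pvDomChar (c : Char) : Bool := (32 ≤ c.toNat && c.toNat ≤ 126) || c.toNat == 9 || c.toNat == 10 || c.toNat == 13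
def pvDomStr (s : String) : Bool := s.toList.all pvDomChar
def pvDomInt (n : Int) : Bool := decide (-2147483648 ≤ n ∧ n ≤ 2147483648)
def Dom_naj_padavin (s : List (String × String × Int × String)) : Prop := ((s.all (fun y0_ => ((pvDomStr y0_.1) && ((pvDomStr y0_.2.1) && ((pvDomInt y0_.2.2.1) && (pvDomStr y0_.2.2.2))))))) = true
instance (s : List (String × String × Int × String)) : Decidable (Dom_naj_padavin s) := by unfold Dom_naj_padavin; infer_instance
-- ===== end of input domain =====

-- B replaces A's fused max-tracking-and-collect pass by a two-pass compute-max-then-filter decomposition (objective: simpler).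


-- ===== PORT A =====
-- fused pass: state (naj_kolicina, naj_datumi); k > naj resets the set to {d}, k == naj adds d
def naj_padavin (s : List (String × String × Int × String)) : List String :=
  (s.foldl (fun st x =>
      if x.2.2.1 > st.1 then (x.2.2.1, PySem.Set.ofList [x.1])
      else if x.2.2.1 == st.1 then (st.1, PySem.Set.add st.2 x.1)
      else st)
    ((0 : Int), (PySem.Set.empty : PySem.Set String))).2

-- ===== PORT B =====
-- two passes: maximum amount m (seeded at 0), then the set comprehension {d | k == m}
def naj_padavin_alt (s : List (String × String × Int × String)) : List String :=
  let m : Int := s.foldl (fun m x => if x.2.2.1 > m then x.2.2.1 else m) 0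
  PySem.Set.ofList ((s.filter (fun x => x.2.2.1 == m)).map (fun x => x.1))

-- ===== PRECONDITION & SPEC =====
def Spec_naj_padavin (s : List (String × String × Int × String)) (out : List String) : Prop := out = naj_padavin_alt s
instance (s : List (String × String × Int × String)) (out : List String) : Decidable (Spec_naj_padavin s out) := by unfold Spec_naj_padavin; infer_instance

-- ===== CLAIM (what is proved, stated in full; the proofs are below) =====
def Claim_equal_naj_padavin : Prop := ∀ (s : List (String × String × Int × String)), Dom_naj_padavin s → Spec_naj_padavin s (naj_padavin s)

-- ===== LEMMAS AND PROOFS =====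

def pvMaxF : List (String × String × Int × String) → Int → Int :=
  fun s a => s.foldl (fun m x => if x.2.2.1 > m then x.2.2.1 else m) a

theorem pvMaxF_ge (s : List (String × String × Int × String)) (a : Int) :
    a ≤ pvMaxF s a ∧ ∀ y ∈ s, y.2.2.1 ≤ pvMaxF s a := by
  induction s generalizing a with
  | nil => simp [pvMaxF]
  | cons x t ih =>
    have h := ih (if x.2.2.1 > a then x.2.2.1 else a)
    constructor
    · refine le_trans ?_ h.1
      split <;> omega
    · intro y hy
      rcases List.mem_cons.mp hy with hy | hy
      · subst hy
        refine le_trans ?_ h.1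
        split <;> omega
      · exact h.2 y hy

theorem ofList_append_singleton {α : Type} [BEq α] (l : List α) (a : α) :
    PySem.Set.ofList (l ++ [a]) = PySem.Set.add (PySem.Set.ofList l) a := by
  simp [PySem.Set.ofList_eq_foldl, List.foldl_append]

theorem naj_padavin_invariant (s : List (String × String × Int × String)) :
    (s.foldl (fun st x =>
      if x.2.2.1 > st.1 then (x.2.2.1, PySem.Set.ofList [x.1])
      else if x.2.2.1 == st.1 then (st.1, PySem.Set.add st.2 x.1)
      else st)
    ((0 : Int), (PySem.Set.empty : PySem.Set String)))
    = (pvMaxF s 0,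
       PySem.Set.ofList ((s.filter (fun x => x.2.2.1 == pvMaxF s 0)).map (fun x => x.1))) := by
  induction s using List.reverseRecOn with
  | nil => simp [pvMaxF, PySem.Set.empty, PySem.Set.ofList]
  | append_singleton t x ih =>
    have hM : pvMaxF (t ++ [x]) 0
        = if x.2.2.1 > pvMaxF t 0 then x.2.2.1 else pvMaxF t 0 := by
      simp [pvMaxF, List.foldl_append]
    have hle := (pvMaxF_ge t 0).2
    rw [List.foldl_append, ih]
    by_cases h1 : x.2.2.1 > pvMaxF t 0
    · -- reset case: no element of t reaches the new max
      have hfilt : t.filter (fun y => y.2.2.1 == x.2.2.1) = [] := by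
        rw [List.filter_eq_nil_iff]
        intro y hy
        have := hle y hy
        simp only [beq_iff_eq]
        omega
      simp only [List.foldl_cons, List.foldl_nil, hM, h1, if_true]
      rw [List.filter_append, hfilt]
      simp
    · rw [hM, if_neg h1]
      by_cases h2 : x.2.2.1 = pvMaxF t 0
      · simp only [List.foldl_cons, List.foldl_nil, h2, beq_self_eq_true, if_true]
        rw [if_neg (lt_irrefl _), List.filter_append]
        have : List.filter (fun y => y.2.2.1 == pvMaxF t 0) [x] = [x] := by
          simp [h2]
        rw [this]
        simp [ofList_append_singleton]
      · simp only [List.foldl_cons, List.foldl_nil, if_neg h1]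
        rw [if_neg (by simpa using h2)]
        rw [List.filter_append]
        have : List.filter (fun y => y.2.2.1 == pvMaxF t 0) [x] = [] := by
          simp [h2]
        simp [this]

-- ===== VERDICT (by name: the statement is the Claim_ definition above) =====
theorem naj_padavin_spec : Claim_equal_naj_padavin := by
  intro s _
  unfold Spec_naj_padavin naj_padavin naj_padavin_alt
  rw [naj_padavin_invariant]
  simp [pvMaxF]
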